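-- pv_equiv track=rewrite | github.com/choyeongwook/Algorithm | Programmers/Lv3/숫자 게임.py | solution
-- ===== SOURCE A (Python) =====
-- from bisect import bisect_right
--
-- def solution(A, B):
--     B.sort()
--     result = 0
--     for element in A:
--         index = bisect_right(B, element)
--
--         if index < len(B):
--             B.pop(index)
--             result += 1
--         else:
--             B.pop(0)
--
--     return result
-- ===== SOURCE B (Python) =====
-- # Two-pointer greedy over both lists sorted once; O((n+m)log(n+m)) instead of
-- # A's per-element bisect + O(m) pop.  Note: A sorts/empties its argument B in
-- # place; this version leaves both arguments untouched (return value is equal).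
-- def solution(A, B):
--     sa = sorted(A)
--     sb = sorted(B)
--     wins = 0
--     j = 0
--     for a in sa:
--         while j < len(sb) and sb[j] <= a:
--             j += 1
--         if j < len(sb):
--             wins += 1
--             j += 1
--         else:
--             break
--     return wins
-- ===== Notes on version B (the rewrite author's own statement) =====
-- stated objective: faster
-- what changed: Replaces A's per-element bisect_right + list.pop loop over a repeatedly mutated sorted list with a sort-both-once two-pointer greedy scan (correct because the greedy count is invariant under the processing order of A).
import Mathlib
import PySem

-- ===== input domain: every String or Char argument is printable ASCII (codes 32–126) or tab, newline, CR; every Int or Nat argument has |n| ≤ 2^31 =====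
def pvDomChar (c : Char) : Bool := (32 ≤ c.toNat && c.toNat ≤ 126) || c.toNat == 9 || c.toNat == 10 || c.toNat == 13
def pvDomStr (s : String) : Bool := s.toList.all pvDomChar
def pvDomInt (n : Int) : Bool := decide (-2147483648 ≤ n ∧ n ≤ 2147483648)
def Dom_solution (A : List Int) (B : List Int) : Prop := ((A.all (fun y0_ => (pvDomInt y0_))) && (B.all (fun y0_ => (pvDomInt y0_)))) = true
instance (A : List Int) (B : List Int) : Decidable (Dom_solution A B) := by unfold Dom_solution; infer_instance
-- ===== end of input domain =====

-- B replaces A's per-element bisect+pop loop over a mutated sorted list by a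
-- sort-both-once two-pointer greedy scan; equal return value on Pre_ (note: the
-- Python A sorts and empties its argument B in place, B's Python does not —
-- the equivalence proved here is about the return value).

-- ===== PORT A =====
-- loop body of A: state = (remaining elements of A, current sorted B, result)
def solGoA : List Int → List Int → Int → Int
  | [], _, result => result
  | element :: rest, bs, result =>
      let index := PySem.List.bisectRight bs element
      if index < bs.length then
        match PySem.List.pop? bs (index : Int) with
        | some (_, bs') => solGoA rest bs' (result + 1)
        | none => result + 1        -- unreachable: index < len(bs)
      else
        match PySem.List.pop? bs 0 with
        | some (_, bs') => solGoA rest bs' result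
        | none => result            -- Python raises IndexError here; outside Pre_

def solution (A : List Int) (B : List Int) : Int :=
  solGoA A (PySem.List.sorted B (fun b => b)) 0

-- ===== PORT B =====
-- Source B's main loop: the index j into sorted(B) is represented by the
-- not-yet-consumed suffix of sorted(B); `break` = the `[]` case.
def tpGo : List Int → List Int → Int
  | [], _ => 0
  | _ :: _, [] => 0
  | a :: as, b :: bs => if b ≤ a then tpGo (a :: as) bs else 1 + tpGo as bs

def solution_alt (A : List Int) (B : List Int) : Int :=
  tpGo (PySem.List.sorted A (fun a => a)) (PySem.List.sorted B (fun b => b))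

-- ===== PRECONDITION & SPEC =====
-- A pops one element of B per element of A and raises IndexError once B is
-- exhausted: Pre_ is exactly the inputs where A returns normally.
def Pre_solution (A : List Int) (B : List Int) : Prop := A.length ≤ B.length
instance (A : List Int) (B : List Int) : Decidable (Pre_solution A B) := by unfold Pre_solution; infer_instance
def pvWitness_solution : List Int × List Int := ([3, 1], [2, 5, 4])

def Spec_solution (A : List Int) (B : List Int) (out : Int) : Prop := out = solution_alt A B
instance (A : List Int) (B : List Int) (out : Int) : Decidable (Spec_solution A B out) := by unfold Spec_solution; infer_instance

-- ===== CLAIM (what is proved, stated in full; the proofs are below) =====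
def Claim_equal_solution : Prop := ∀ (A : List Int) (B : List Int), Dom_solution A B → Pre_solution A B → Spec_solution A B (solution A B)

-- ===== LEMMAS AND PROOFS =====

-- `succ? a bs` = the first element of (sorted) bs strictly greater than a.
def succ? (a : Int) (bs : List Int) : Option Int :=
  (bs.dropWhile (fun b => decide (b ≤ a))).head?

-- abstract form of A's loop: match a with its successor (erase it) or pop the head
def cnt : List Int → List Int → Int
  | [], _ => 0
  | a :: as, bs =>
      match succ? a bs with
      | some b => 1 + cnt as (bs.erase b)
      | none => cnt as bs.tail

lemma cnt_nil_right : ∀ as, cnt as [] = 0 := by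
  intro as; induction as with
  | nil => rfl
  | cons a as ih => simp [cnt, succ?, ih]

-- dropWhile over a prefix that wholly satisfies the predicate
lemma dropWhile_append_sat {α : Type} (p : α → Bool) :
    ∀ (L R : List α), (∀ b ∈ L, p b = true) → (L ++ R).dropWhile p = R.dropWhile p := by
  intro L R h
  induction L with
  | nil => rfl
  | cons b L ih =>
      simp only [List.cons_append, List.dropWhile_cons, h b (by simp)]
      exact ih (fun x hx => h x (by simp [hx]))

lemma dropWhile_head_false {α : Type} (p : α → Bool) :
    ∀ (l : List α) b r, l.dropWhile p = b :: r → p b = false := by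
  intro l
  induction l with
  | nil => intro b r h; simp at h
  | cons x t ih =>
      intro b r h
      by_cases hx : p x
      · rw [List.dropWhile_cons_of_pos hx] at h; exact ih b r h
      · rw [List.dropWhile_cons_of_neg hx] at h
        cases h; simpa using hx

lemma succ?_eq_none_iff (a : Int) (bs : List Int) :
    succ? a bs = none ↔ ∀ b ∈ bs, b ≤ a := by
  unfold succ?
  rw [List.head?_eq_none_iff, List.dropWhile_eq_nil_iff]
  simp

lemma succ?_none_sublist {a : Int} {l bs : List Int} (hsub : l.Sublist bs)
    (h : succ? a bs = none) : succ? a l = none := by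
  rw [succ?_eq_none_iff] at h ⊢
  exact fun b hb => h b (hsub.mem hb)

lemma succ?_spec {a s : Int} {bs : List Int} (hs : bs.Pairwise (· ≤ ·))
    (h : succ? a bs = some s) : s ∈ bs ∧ a < s ∧ ∀ b ∈ bs, a < b → s ≤ b := by
  unfold succ? at h
  rcases hd : bs.dropWhile (fun b => decide (b ≤ a)) with _ | ⟨b₀, R⟩
  · rw [hd] at h; simp at h
  · rw [hd] at h
    simp only [List.head?_cons, Option.some.injEq] at h
    subst s
    have hmem : b₀ ∈ bs := (List.dropWhile_sublist _).mem (by rw [hd]; simp)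
    have hgt : a < b₀ := by
      have := dropWhile_head_false _ bs b₀ R hd
      simpa using this
    refine ⟨hmem, hgt, ?_⟩
    intro b hb hab
    -- b is not in the takeWhile prefix (elements there are ≤ a); so b = s or b ∈ R
    have hsplit := List.takeWhile_append_dropWhile (p := fun b => decide (b ≤ a)) (l := bs)
    rw [hd] at hsplit
    have hb' : b ∈ bs.takeWhile (fun b => decide (b ≤ a)) ++ (b₀ :: R) := by rw [hsplit]; exact hb
    rcases List.mem_append.mp hb' with hbl | hbr
    · have := List.mem_takeWhile_imp hbl
      simp at this; omega
    · rcases List.mem_cons.mp hbr with rfl | hbR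
      · exact le_refl _
      · have hpair : (b₀ :: R).Pairwise (· ≤ ·) := by
          have : (b₀ :: R).Sublist bs := by rw [← hd]; exact List.dropWhile_sublist _
          exact hs.sublist this
        exact (List.pairwise_cons.mp hpair).1 b hbR

lemma succ?_of_spec {a s : Int} : ∀ {bs : List Int}, bs.Pairwise (· ≤ ·) →
    s ∈ bs → a < s → (∀ b ∈ bs, a < b → s ≤ b) → succ? a bs = some s := by
  intro bs
  induction bs with
  | nil => intro _ h; simp at h
  | cons c t ih =>
      intro hs hmem hgt hmin
      by_cases hc : c ≤ a
      · have hst : s ∈ t := by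
          rcases List.mem_cons.mp hmem with rfl | h
          · omega
          · exact h
        have : succ? a t = some s := by
          refine ih (List.pairwise_cons.mp hs).2 hst hgt ?_
          intro b hb hab; exact hmin b (by simp [hb]) hab
        unfold succ? at this ⊢
        rw [List.dropWhile_cons_of_pos (by simpa using hc)]
        exact this
      · unfold succ?
        rw [List.dropWhile_cons_of_neg (by simpa using hc)]
        simp only [List.head?_cons, Option.some.injEq]
        have h1 : s ≤ c := hmin c (by simp) (by omega)
        rcases List.mem_cons.mp hmem with rfl | h
        · rfl
        · have : c ≤ s := (List.pairwise_cons.mp hs).1 s h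
          omega

-- zero lemma: if every b is ≤ some bound c and every remaining a is ≥ c, no wins
lemma cnt_zero {c : Int} : ∀ (as bs : List Int), (∀ b ∈ bs, b ≤ c) → (∀ x ∈ as, c ≤ x) →
    cnt as bs = 0 := by
  intro as
  induction as with
  | nil => intro bs _ _; rfl
  | cons a as ih =>
      intro bs hb ha
      have hnone : succ? a bs = none := by
        rw [succ?_eq_none_iff]
        intro b hbm
        have := hb b hbm
        have := ha a (by simp)
        omega
      simp only [cnt, hnone]
      exact ih bs.tail (fun b hbm => hb b (List.tail_sublist bs |>.mem hbm))
        (fun x hx => ha x (by simp [hx]))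

-- a prefix of elements ≤ c (≤ every remaining a) does not change the count
lemma cnt_prefix_irrel : ∀ (as : List Int), as.Pairwise (· ≤ ·) →
    ∀ (c : Int) (L R : List Int), (∀ x ∈ as, c ≤ x) → (∀ b ∈ L, b ≤ c) →
    cnt as (L ++ R) = cnt as R := by
  intro as
  induction as with
  | nil => intro _ _ _ _ _ _; rfl
  | cons a as ih =>
      intro hs c L R ha hL
      have haa : c ≤ a := ha a (by simp)
      have hLa : ∀ b ∈ L, (fun b => decide (b ≤ a)) b = true := by
        intro b hb; have := hL b hb; simp; omega
      have hdw : (L ++ R).dropWhile (fun b => decide (b ≤ a)) = R.dropWhile (fun b => decide (b ≤ a)) :=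
        dropWhile_append_sat _ L R hLa
      have hsucc : succ? a (L ++ R) = succ? a R := by unfold succ?; rw [hdw]
      have has : ∀ x ∈ as, a ≤ x := (List.pairwise_cons.mp hs).1
      rcases hR : succ? a R with _ | ⟨s⟩
      · -- no successor: everything (L and R) ≤ a; both sides are 0 after this step
        have hRle : ∀ b ∈ R, b ≤ a := (succ?_eq_none_iff a R).mp hR
        simp only [cnt, hsucc, hR]
        have h1 : cnt as (L ++ R).tail = 0 := by
          refine cnt_zero (c := a) as _ ?_ has
          intro b hb
          have hb' : b ∈ L ++ R := (List.tail_sublist _).mem hb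
          rcases List.mem_append.mp hb' with h | h
          · have := hL b h; omega
          · exact hRle b h
        have h2 : cnt as R.tail = 0 := by
          refine cnt_zero (c := a) as _ ?_ has
          intro b hb; exact hRle b ((List.tail_sublist _).mem hb)
        rw [h1, h2]
      · -- successor s is in R; erase commutes with the prefix
        have hsR : a < s := by
          unfold succ? at hR
          rcases hdr : R.dropWhile (fun b => decide (b ≤ a)) with _ | ⟨b₀, R'⟩
          · rw [hdr] at hR; simp at hR
          · rw [hdr] at hR; simp only [List.head?_cons, Option.some.injEq] at hR
            subst hR
            have := dropWhile_head_false _ R b₀ R' hdr; simpa using this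
        have hsnL : s ∉ L := fun hmem => by have := hL s hmem; omega
        have her : (L ++ R).erase s = L ++ R.erase s := List.erase_append_right _ hsnL
        simp only [cnt, hsucc, hR, her]
        have hpw : as.Pairwise (· ≤ ·) := (List.pairwise_cons.mp hs).2
        rw [ih hpw a L (R.erase s) has (fun b hb => by have := hL b hb; omega)]

-- skipping a prefix of elements ≤ a in the two-pointer scan
lemma tpGo_skip (a : Int) (as : List Int) :
    ∀ (L u : List Int), (∀ b ∈ L, b ≤ a) → tpGo (a :: as) (L ++ u) = tpGo (a :: as) u := by
  intro L
  induction L with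
  | nil => intro u _; rfl
  | cons b L ih =>
      intro u h
      have hb : b ≤ a := h b (by simp)
      simp only [List.cons_append, tpGo, if_pos hb]
      exact ih u (fun x hx => h x (by simp [hx]))

-- on sorted inputs the abstract count is the two-pointer count
lemma cnt_eq_tpGo : ∀ (as : List Int), as.Pairwise (· ≤ ·) →
    ∀ (bs : List Int), bs.Pairwise (· ≤ ·) → cnt as bs = tpGo as bs := by
  intro as
  induction as with
  | nil => intro _ bs _; cases bs <;> simp [cnt, tpGo]
  | cons a as ih =>
      intro hsa bs hsb
      have hsplit := List.takeWhile_append_dropWhile (p := fun b => decide (b ≤ a)) (l := bs)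
      have hTW : ∀ b ∈ bs.takeWhile (fun b => decide (b ≤ a)), b ≤ a := by
        intro b hb; have := List.mem_takeWhile_imp hb; simpa using this
      have has : ∀ x ∈ as, a ≤ x := (List.pairwise_cons.mp hsa).1
      have hpwas : as.Pairwise (· ≤ ·) := (List.pairwise_cons.mp hsa).2
      rcases hd : bs.dropWhile (fun b => decide (b ≤ a)) with _ | ⟨b₀, R⟩
      · -- all of bs ≤ a: count 0 on both sides
        have hall : ∀ b ∈ bs, b ≤ a := by
          rw [List.dropWhile_eq_nil_iff] at hd
          intro b hb; have := hd b hb; simpa using this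
        have hnone : succ? a bs = none := by unfold succ?; rw [hd]; rfl
        simp only [cnt, hnone]
        rw [cnt_zero (c := a) as bs.tail (fun b hb => hall b ((List.tail_sublist _).mem hb)) has]
        have := tpGo_skip a as bs [] hall
        rw [List.append_nil] at this
        rw [this]; cases as <;> simp [tpGo]
      · have hsucc : succ? a bs = some b₀ := by unfold succ?; rw [hd]; rfl
        have hb₀ : a < b₀ := by
          have := dropWhile_head_false _ bs b₀ R hd; simpa using this
        have hb₀nTW : b₀ ∉ bs.takeWhile (fun b => decide (b ≤ a)) := fun hm => by
          have := hTW b₀ hm; omega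
        have her : bs.erase b₀ = bs.takeWhile (fun b => decide (b ≤ a)) ++ R := by
          conv_lhs => rw [← hsplit]
          rw [hd, List.erase_append_right _ hb₀nTW, List.erase_cons_head]
        have hRpw : R.Pairwise (· ≤ ·) := by
          have : (b₀ :: R).Sublist bs := by rw [← hd]; exact List.dropWhile_sublist _
          exact (List.pairwise_cons.mp (hsb.sublist this)).2
        simp only [cnt, hsucc, her]
        rw [cnt_prefix_irrel as hpwas a _ R has hTW, ih hpwas R hRpw]
        conv_rhs => rw [← hsplit, hd]
        rw [tpGo_skip a as _ (b₀ :: R) hTW]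
        simp [tpGo, not_le.mpr hb₀]

lemma head_lb {c : Int} {t : List Int} (hs : (c :: t).Pairwise (· ≤ ·)) :
    ∀ b ∈ c :: t, c ≤ b := by
  intro b hb
  rcases List.mem_cons.mp hb with rfl | h
  · exact le_refl _
  · exact (List.pairwise_cons.mp hs).1 b h

-- the swap lemma, for x ≤ y
lemma cnt_swap_aux {x y : Int} (hxy : x ≤ y) (t : List Int) :
    ∀ (bs : List Int), bs.Pairwise (· ≤ ·) → 2 ≤ bs.length →
    cnt (x :: y :: t) bs = cnt (y :: x :: t) bs := by
  intro bs hs hlen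
  rcases hsy : succ? y bs with _ | ⟨sy⟩
  · -- no b > y
    have hally : ∀ b ∈ bs, b ≤ y := (succ?_eq_none_iff y bs).mp hsy
    rcases hsx : succ? x bs with _ | ⟨sx⟩
    · -- no b > x either: both orders pop the head twice
      have hallx : ∀ b ∈ bs, b ≤ x := (succ?_eq_none_iff x bs).mp hsx
      have hx' : succ? x bs.tail = none := succ?_none_sublist (List.tail_sublist bs) hsx
      have hy' : succ? y bs.tail = none := succ?_none_sublist (List.tail_sublist bs) hsy
      simp [cnt, hsx, hsy, hx', hy']
    · obtain ⟨hmem, hgt, hmin⟩ := succ?_spec hs hsx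
      rcases bs with _ | ⟨m, t2⟩
      · simp at hmem
      have hmt2 : ∀ b ∈ t2, m ≤ b := (List.pairwise_cons.mp hs).1
      have ht2pw : t2.Pairwise (· ≤ ·) := (List.pairwise_cons.mp hs).2
      by_cases hmx : m ≤ x
      · -- head m ≤ x: m ≠ sx; the two orders erase {sx, m} in either order
        have hne : sx ≠ m := by omega
        have hsxt2 : sx ∈ t2 := by
          rcases List.mem_cons.mp hmem with rfl | h; · omega
          · exact h
        have her : (m :: t2).erase sx = m :: t2.erase sx := by
          rw [List.erase_cons_tail (by simp [Ne.symm hne])]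
        have hy2 : succ? y ((m :: t2).erase sx) = none :=
          succ?_none_sublist List.erase_sublist hsy
        rw [her] at hy2
        have hx2 : succ? x t2 = some sx := by
          refine succ?_of_spec ht2pw hsxt2 hgt ?_
          intro b hb hab; exact hmin b (by simp [hb]) hab
        simp [cnt, hsx, hsy, hy2, her, hx2]
      · -- x < m = min bs: sx = m; both orders shave the two smallest elements
        have hsxm : sx = m := by
          have h1 : sx ≤ m := hmin m (by simp) (by omega)
          have h2 : m ≤ sx := head_lb hs sx hmem
          omega
        subst hsxm
        rcases t2 with _ | ⟨c, t3⟩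
        · simp at hlen
        have hxc : x < c := by have := hmt2 c (by simp); omega
        have hx2 : succ? x (c :: t3) = some c := by
          unfold succ?
          rw [List.dropWhile_cons_of_neg (by simp; omega)]
          rfl
        have hy2 : succ? y (c :: t3) = none :=
          succ?_none_sublist (List.tail_sublist (sx :: c :: t3)) hsy
        simp [cnt, hsx, hsy, hy2, hx2, List.erase_cons_head]
  · -- y has a successor sy; then x has one too
    obtain ⟨hmemy, hgty, hminy⟩ := succ?_spec hs hsy
    rcases hsx : succ? x bs with _ | ⟨sx⟩
    · exfalso
      have := (succ?_eq_none_iff x bs).mp hsx sy hmemy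
      omega
    obtain ⟨hmemx, hgtx, hminx⟩ := succ?_spec hs hsx
    have hsxsy : sx ≤ sy := hminx sy hmemy (by omega)
    by_cases heq : sx = sy
    · -- same successor: the predicates (≤ x) and (≤ y) agree on bs and its sublists
      subst heq
      have hiff : ∀ b ∈ bs, (decide (b ≤ x)) = (decide (b ≤ y)) := by
        intro b hb
        by_cases hbx : b ≤ x
        · simp [hbx]; omega
        · have : sx ≤ b := hminx b hb (by omega)
          simp [hbx]; omega
      have hcongr : ∀ (l : List Int), l.Sublist bs → succ? x l = succ? y l := by
        intro l hsub
        unfold succ?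
        congr 1
        induction l with
        | nil => rfl
        | cons c lt ih =>
            have hc := hiff c (hsub.mem (by simp))
            have ih' := ih (List.sublist_of_cons_sublist hsub)
            by_cases hcx : c ≤ x
            · rw [List.dropWhile_cons_of_pos (by simpa using hcx),
                List.dropWhile_cons_of_pos (by rw [← hc]; simpa using hcx)]
              exact ih'
            · rw [List.dropWhile_cons_of_neg (by simpa using hcx),
                List.dropWhile_cons_of_neg (by rw [← hc]; simpa using hcx)]
      have h2 := hcongr (bs.erase sx) List.erase_sublist
      rcases h3 : succ? y (bs.erase sx) with _ | ⟨v⟩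
      · simp [cnt, hsx, hsy, h3, h2.trans h3]
      · simp [cnt, hsx, hsy, h3, h2.trans h3]
    · -- sx < sy: then sx ≤ y, and the two orders erase {sx, sy} in either order
      have hlt : sx < sy := by omega
      have hsxy : sx ≤ y := by
        by_contra h
        push Not at h
        have := hminy sx hmemx h
        omega
      have hy2 : succ? y (bs.erase sx) = some sy := by
        refine succ?_of_spec (hs.sublist List.erase_sublist) ?_ hgty ?_
        · exact (List.mem_erase_of_ne (by omega)).mpr hmemy
        · intro b hb hab; exact hminy b (List.erase_sublist.mem hb) hab
      have hx2 : succ? x (bs.erase sy) = some sx := by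
        refine succ?_of_spec (hs.sublist List.erase_sublist) ?_ hgtx ?_
        · exact (List.mem_erase_of_ne (by omega)).mpr hmemx
        · intro b hb hab; exact hminx b (List.erase_sublist.mem hb) hab
      simp [cnt, hsx, hsy, hy2, hx2, List.erase_comm]

lemma cnt_swap (x y : Int) (t : List Int) (bs : List Int)
    (hs : bs.Pairwise (· ≤ ·)) (hlen : 2 ≤ bs.length) :
    cnt (x :: y :: t) bs = cnt (y :: x :: t) bs := by
  rcases le_total x y with h | h
  · exact cnt_swap_aux h t bs hs hlen
  · exact (cnt_swap_aux h t bs hs hlen).symm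

-- the count does not depend on the order of A (given enough elements in B)
lemma cnt_perm : ∀ {as as' : List Int}, as.Perm as' → ∀ (bs : List Int),
    bs.Pairwise (· ≤ ·) → as.length ≤ bs.length → cnt as bs = cnt as' bs := by
  intro as as' hp
  induction hp with
  | nil => intro _ _ _; rfl
  | cons a p ih =>
      intro bs hs hlen
      rcases hsa : succ? a bs with _ | ⟨s⟩
      · have hbs : bs ≠ [] := by intro h; subst h; simp at hlen
        simp only [cnt, hsa]
        refine ih bs.tail (hs.sublist (List.tail_sublist bs)) ?_
        rcases bs with _ | ⟨c, t2⟩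
        · simp at hlen
        · simp at hlen ⊢; omega
      · obtain ⟨hmem, _, _⟩ := succ?_spec hs hsa
        simp only [cnt, hsa]
        congr 1
        refine ih (bs.erase s) (hs.sublist List.erase_sublist) ?_
        rw [List.length_erase_of_mem hmem]
        simp at hlen
        have := p.length_eq
        omega
  | swap x y l =>
      intro bs hs hlen
      exact cnt_swap y x l bs hs (by simp at hlen; omega)
  | trans p q ih1 ih2 =>
      intro bs hs hlen
      rw [ih1 bs hs hlen, ih2 bs hs (by rw [← p.length_eq]; exact hlen)]

-- dropWhile described by an index k with the bisect spec
lemma dropWhile_eq_drop {α : Type} (p : α → Bool) :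
    ∀ (l : List α) (k : Nat), k ≤ l.length →
    (∀ j (h : j < l.length), j < k → p l[j] = true) →
    (∀ j (h : j < l.length), k ≤ j → p l[j] = false) →
    l.dropWhile p = l.drop k := by
  intro l
  induction l with
  | nil => intro k hk _ _; simp at hk; subst hk; rfl
  | cons b t ih =>
      intro k hk h1 h2
      cases k with
      | zero =>
          have := h2 0 (by simp) (by omega)
          simp only [List.getElem_cons_zero] at this
          rw [List.dropWhile_cons_of_neg (by simp [this]), List.drop_zero]
      | succ k' =>
          have hb := h1 0 (by simp) (by omega)
          simp only [List.getElem_cons_zero] at hb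
          rw [List.dropWhile_cons_of_pos hb, List.drop_succ_cons]
          refine ih k' (by simpa using hk) ?_ ?_
          · intro j hj hjk
            have := h1 (j + 1) (by simpa using hj) (by omega)
            simpa using this
          · intro j hj hjk
            have := h2 (j + 1) (by simpa using hj) (by omega)
            simpa using this

-- A's loop computes the abstract count (on a sorted bs)
lemma solGoA_eq_cnt : ∀ (as bs : List Int) (r : Int), bs.Pairwise (· ≤ ·) →
    solGoA as bs r = r + cnt as bs := by
  intro as
  induction as with
  | nil => intro bs r _; simp [solGoA, cnt]
  | cons a as ih =>
      intro bs r hs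
      obtain ⟨hk1, hk2, hk3⟩ := PySem.List.bisectRight_spec bs a hs
      set k := PySem.List.bisectRight bs a with hkdef
      have hdw : bs.dropWhile (fun b => decide (b ≤ a)) = bs.drop k := by
        refine dropWhile_eq_drop _ bs k hk1 ?_ ?_
        · intro j hj hjk; simpa using hk2 j hj hjk
        · intro j hj hjk; have := hk3 j hj hjk; simp; omega
      by_cases hkl : k < bs.length
      · -- matched branch
        have hpop : PySem.List.pop? bs (k : Int) = some (bs[k], bs.eraseIdx k) :=
          PySem.List.pop?_natCast bs k hkl
        have hdrop : bs.drop k = bs[k] :: bs.drop (k + 1) := by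
          rw [List.drop_eq_getElem_cons hkl]
        have hsucc : succ? a bs = some bs[k] := by
          unfold succ?; rw [hdw, hdrop]; rfl
        have hak : a < bs[k] := by simpa using hk3 k hkl (le_refl _)
        have hnotin : bs[k] ∉ bs.take k := by
          intro hm
          obtain ⟨j, hj, hjk⟩ := List.mem_take_iff_getElem.mp hm
          have hjlt : j < k := by omega
          have := hk2 j (by omega) hjlt
          simp at this
          omega
        have h0 : bs = bs.take k ++ bs[k] :: bs.drop (k + 1) := by
          rw [← hdrop, List.take_append_drop]
        have her : bs.erase bs[k] = bs.eraseIdx k := by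
          calc bs.erase bs[k]
              = (bs.take k ++ bs[k] :: bs.drop (k + 1)).erase bs[k] := by rw [← h0]
            _ = bs.take k ++ ((bs[k] :: bs.drop (k + 1)).erase bs[k]) :=
                List.erase_append_right _ hnotin
            _ = bs.take k ++ bs.drop (k + 1) := by rw [List.erase_cons_head]
            _ = bs.eraseIdx k := (List.eraseIdx_eq_take_drop_succ bs k).symm
        simp only [solGoA]
        rw [← hkdef, if_pos hkl, hpop]
        show solGoA as (bs.eraseIdx k) (r + 1) = r + cnt (a :: as) bs
        rw [ih (bs.eraseIdx k) (r + 1) (hs.sublist (List.eraseIdx_sublist bs k))]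
        simp only [cnt, hsucc, her]
        ring
      · -- unmatched branch: pop(0)
        have hnone : succ? a bs = none := by
          unfold succ?
          rw [hdw, List.drop_eq_nil_of_le (by omega)]
          rfl
        rcases bs with _ | ⟨c, t2⟩
        · simp only [solGoA]
          rw [← hkdef, if_neg hkl]
          simp [PySem.List.pop?, cnt, hnone, cnt_nil_right]
        · simp only [solGoA]
          rw [← hkdef, if_neg hkl]
          rw [PySem.List.pop?_zero_cons]
          show solGoA as t2 r = r + cnt (a :: as) (c :: t2)
          rw [ih t2 r ((List.pairwise_cons.mp hs).2)]
          simp [cnt, hnone]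

-- ===== VERDICT (by name: the statement is the Claim_ definition above) =====
theorem solution_spec : Claim_equal_solution := by
  intro A B _hdom hpre
  unfold Spec_solution solution solution_alt
  have hsb : (PySem.List.sorted B (fun b => b)).Pairwise (· ≤ ·) :=
    PySem.List.sorted_pairwise B (fun b => b)
  have hsa : (PySem.List.sorted A (fun a => a)).Pairwise (· ≤ ·) :=
    PySem.List.sorted_pairwise A (fun a => a)
  rw [solGoA_eq_cnt A _ 0 hsb, zero_add]
  rw [cnt_perm (PySem.List.sorted_perm A (fun a => a) false).symm _ hsb
    (by simpa [PySem.List.length_sorted] using hpre)]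
  exact cnt_eq_tpGo _ hsa _ hsb
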